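-- pv_equiv track=rewrite | github.com/12hsrate-hub/lawyer5rp | web/ogp_web/services/legal_pipeline_service.py | normalize_feedback_issues
-- ===== SOURCE A (Python) =====
-- from typing import Any, Iterable
--
-- FEEDBACK_ISSUE_ALIASES: dict[str, tuple[str, ...]] = {
--     "wrong_fact": ("fact", "facts", "wrongfact", "bad_fact"),
--     "wrong_law": ("law", "wronglaw", "bad_law", "wrong_norm"),
--     "missing_law": ("missing_norm", "missing_article", "missing_source"),
--     "hallucination": ("made_up", "fabricated", "external_fact"),
--     "guard_false_positive": ("guard_fp", "false_positive"),
--     "guard_false_negative": ("guard_fn", "false_negative"),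
--     "unclear_answer": ("unclear", "vague", "weak_answer"),
-- }
--
-- def normalize_feedback_issues(raw_issues: Iterable[str]) -> tuple[str, ...]:
--     normalized: list[str] = []
--     for raw_issue in raw_issues:
--         value = str(raw_issue or "").strip().lower().replace("-", "_").replace(" ", "_")
--         if not value:
--             continue
--         canonical = None
--         for issue_code, aliases in FEEDBACK_ISSUE_ALIASES.items():
--             if value == issue_code or value in aliases:
--                 canonical = issue_code
--                 break
--         if canonical is None:
--             canonical = "other"
--         if canonical not in normalized:
--             normalized.append(canonical)
--     return tuple(normalized)
-- ===== SOURCE B (Python) =====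
-- FEEDBACK_ISSUE_ALIASES: dict[str, tuple[str, ...]] = {
--     "wrong_fact": ("fact", "facts", "wrongfact", "bad_fact"),
--     "wrong_law": ("law", "wronglaw", "bad_law", "wrong_norm"),
--     "missing_law": ("missing_norm", "missing_article", "missing_source"),
--     "hallucination": ("made_up", "fabricated", "external_fact"),
--     "guard_false_positive": ("guard_fp", "false_positive"),
--     "guard_false_negative": ("guard_fn", "false_negative"),
--     "unclear_answer": ("unclear", "vague", "weak_answer"),
-- }
--
-- # Flat reverse index built once: every canonical code maps to itself, every alias to its code.
-- ALIAS_TO_CANONICAL: dict[str, str] = {}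
-- for _code, _aliases in FEEDBACK_ISSUE_ALIASES.items():
--     ALIAS_TO_CANONICAL[_code] = _code
--     for _a in _aliases:
--         ALIAS_TO_CANONICAL[_a] = _code
--
--
-- def normalize_feedback_issues(raw_issues):
--     cleaned = (str(r or "").strip().lower().replace("-", "_").replace(" ", "_") for r in raw_issues)
--     canon = [ALIAS_TO_CANONICAL.get(v, "other") for v in cleaned if v]
--     return tuple(dict.fromkeys(canon))
-- ===== Notes on version B (the rewrite author's own statement) =====
-- stated objective: simpler
-- what changed: Replaces the per-item nested scan over the alias table (with break and a 'not in result' list scan) by a reverse alias->canonical dict built once, a map-then-filter pass producing the canonical list, and an order-preserving dedup via dict.fromkeys.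
import Mathlib
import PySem

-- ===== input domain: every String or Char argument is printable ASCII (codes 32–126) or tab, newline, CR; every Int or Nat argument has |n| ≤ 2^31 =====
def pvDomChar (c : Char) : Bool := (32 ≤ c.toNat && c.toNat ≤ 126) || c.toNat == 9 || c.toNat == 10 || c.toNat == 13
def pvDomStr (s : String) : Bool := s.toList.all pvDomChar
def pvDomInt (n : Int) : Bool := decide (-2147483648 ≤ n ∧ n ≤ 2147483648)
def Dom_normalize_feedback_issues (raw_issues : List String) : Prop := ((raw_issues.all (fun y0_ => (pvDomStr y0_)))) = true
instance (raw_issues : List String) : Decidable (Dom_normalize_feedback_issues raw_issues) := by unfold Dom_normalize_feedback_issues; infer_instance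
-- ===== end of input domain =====

-- B replaces A's per-item nested alias-table scan by a reverse map built once plus a
-- map/filter pass and an order-preserving dedup (dict.fromkeys); objective: simpler.

-- ===== PORT A =====
def FEEDBACK_ISSUE_ALIASES : List (String × List String) :=
  [("wrong_fact", ["fact", "facts", "wrongfact", "bad_fact"]),
   ("wrong_law", ["law", "wronglaw", "bad_law", "wrong_norm"]),
   ("missing_law", ["missing_norm", "missing_article", "missing_source"]),
   ("hallucination", ["made_up", "fabricated", "external_fact"]),
   ("guard_false_positive", ["guard_fp", "false_positive"]),
   ("guard_false_negative", ["guard_fn", "false_negative"]),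
   ("unclear_answer", ["unclear", "vague", "weak_answer"])]

-- value = str(raw_issue or "").strip().lower().replace("-", "_").replace(" ", "_")
def pvClean (raw : String) : String :=
  PySem.Str.replace
    (PySem.Str.replace (PySem.Str.lower (PySem.Str.strip (if raw == "" then "" else raw))) "-" "_")
    " " "_"

-- the inner 'for issue_code, aliases in …: if …: canonical = issue_code; break'
def pvScanAliases : List (String × List String) → String → Option String
  | [], _ => none
  | (issue_code, aliases) :: rest, value =>
      if value == issue_code || aliases.contains value then some issue_code
      else pvScanAliases rest value

def normalize_feedback_issues (raw_issues : List String) : List String :=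
  raw_issues.foldl
    (fun normalized raw_issue =>
      let value := pvClean raw_issue
      if value == "" then normalized
      else
        let canonical := (pvScanAliases FEEDBACK_ISSUE_ALIASES value).getD "other"
        if normalized.contains canonical then normalized else normalized ++ [canonical])
    []

-- ===== PORT B =====
-- module-level loop building the reverse index ALIAS_TO_CANONICAL
def ALIAS_TO_CANONICAL : PySem.Dict String String :=
  FEEDBACK_ISSUE_ALIASES.foldl
    (fun d p => p.2.foldl (fun d a => d.insert a p.1) (d.insert p.1 p.1))
    PySem.Dict.empty

def normalize_feedback_issues_alt (raw_issues : List String) : List String :=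
  let cleaned := raw_issues.map pvClean
  let canon := (cleaned.filter (fun v => !(v == ""))).map
      (fun v => ALIAS_TO_CANONICAL.getD v "other")
  PySem.List.dedup canon

-- ===== PRECONDITION & SPEC =====
def Spec_normalize_feedback_issues (raw_issues : List String) (out : List String) : Prop := out = normalize_feedback_issues_alt raw_issues
instance (raw_issues : List String) (out : List String) : Decidable (Spec_normalize_feedback_issues raw_issues out) := by unfold Spec_normalize_feedback_issues; infer_instance

-- ===== CLAIM (what is proved, stated in full; the proofs are below) =====
def Claim_equal_normalize_feedback_issues : Prop := ∀ (raw_issues : List String), Dom_normalize_feedback_issues raw_issues → Spec_normalize_feedback_issues raw_issues (normalize_feedback_issues raw_issues)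

-- ===== LEMMAS AND PROOFS =====

-- the flat association list B's reverse map holds: each group contributes its code then its aliases
def pvFlat (groups : List (String × List String)) : List (String × String) :=
  groups.flatMap (fun p => (p.1, p.1) :: p.2.map (fun a => (a, p.1)))

theorem alias_map_eq_flat : ALIAS_TO_CANONICAL = PySem.Dict.mk (pvFlat FEEDBACK_ISSUE_ALIASES) := by
  decide

theorem get?_mk_map_append (aliases : List String) (code : String)
    (L : List (String × String)) (v : String) :
    (PySem.Dict.mk (aliases.map (fun a => (a, code)) ++ L)).get? v
      = if aliases.contains v then some code else (PySem.Dict.mk L).get? v := by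
  induction aliases with
  | nil => simp
  | cons a rest ih =>
      by_cases h : a = v
      · simp [PySem.Dict.get?_mk_cons, h]
      · simp [PySem.Dict.get?_mk_cons, h, ih, Ne.symm h]

theorem scan_eq_get?_flat (groups : List (String × List String)) (v : String) :
    pvScanAliases groups v = (PySem.Dict.mk (pvFlat groups)).get? v := by
  induction groups with
  | nil => rfl
  | cons g rest ih =>
      obtain ⟨code, aliases⟩ := g
      by_cases h : v = code
      · simp [pvScanAliases, pvFlat, PySem.Dict.get?_mk_cons, h]
      · simp [pvScanAliases, pvFlat, PySem.Dict.get?_mk_cons, h, Ne.symm h,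
          get?_mk_map_append, ih]

-- A's nested scan agrees with B's reverse-map lookup on every value string.
theorem scan_eq_lookup (v : String) :
    (pvScanAliases FEEDBACK_ISSUE_ALIASES v).getD "other" = ALIAS_TO_CANONICAL.getD v "other" := by
  rw [alias_map_eq_flat, PySem.Dict.getD_eq_get?_getD, ← scan_eq_get?_flat]

-- A's dedup-on-the-fly fold equals Set.update of the canonical list.
theorem foldA_eq_update (raws : List String) (acc : List String) :
    raws.foldl
      (fun normalized raw_issue =>
        let value := pvClean raw_issue
        if value == "" then normalized
        else
          let canonical := (pvScanAliases FEEDBACK_ISSUE_ALIASES value).getD "other"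
          if normalized.contains canonical then normalized else normalized ++ [canonical])
      acc
    = PySem.Set.update acc
        (((raws.map pvClean).filter (fun v => !(v == ""))).map
          (fun v => ALIAS_TO_CANONICAL.getD v "other")) := by
  induction raws generalizing acc with
  | nil => simp [PySem.Set.update]
  | cons r rest ih =>
      by_cases h : pvClean r == ""
      · simp only [List.foldl_cons, List.map_cons, List.filter_cons, h]
        simpa [h] using ih acc
      · simp only [List.foldl_cons, List.map_cons, List.filter_cons, h]
        rw [ih, scan_eq_lookup]
        simp [PySem.Set.update, PySem.Set.add,
          PySem.Set.contains_eq_listContains]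

-- ===== VERDICT (by name: the statement is the Claim_ definition above) =====
theorem normalize_feedback_issues_spec : Claim_equal_normalize_feedback_issues := by
  intro raw_issues _
  unfold Spec_normalize_feedback_issues normalize_feedback_issues normalize_feedback_issues_alt
  rw [foldA_eq_update, PySem.List.dedup_eq_ofList, PySem.Set.ofList_eq_foldl]
  rfl
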